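-- pv_equiv track=rewrite | github.com/kulixdev/Kulix-Multitool | Program/Config/Utilities.py | MainColor2
-- ===== SOURCE A (Python) =====
-- def MainColor2(text):
--     start_color = (0, 200, 255)
--     end_color = (0, 255, 255)
--
--     num_steps = 9
--
--     colors = []
--     for i in range(num_steps):
--         r = start_color[0] + (end_color[0] - start_color[0]) * i // (num_steps - 1)
--         g = start_color[1] + (end_color[1] - start_color[1]) * i // (num_steps - 1)
--         b = start_color[2] + (end_color[2] - start_color[2]) * i // (num_steps - 1)
--         colors.append((r, g, b))
--
--     colors += list(reversed(colors[:-1]))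
--
--     def text_color(r, g, b):
--         return f"\033[38;2;{r};{g};{b}m"
--
--     lines = text.split('\n')
--     num_colors = len(colors)
--
--     result = []
--     for i, line in enumerate(lines):
--         for j, char in enumerate(line):
--             color_index = (i + j) % num_colors
--             color = colors[color_index]
--             result.append(text_color(*color) + char + "\033[0m")
--
--         if i < len(lines) - 1:
--             result.append('\n')
--
--     return ''.join(result)
-- ===== SOURCE B (Python) =====
-- def MainColor2(text):
--     # mirrored 17-entry palette: only green varies, symmetric around index 8
--     palette = ["\033[38;2;0;%d;255m" % (200 + 55 * min(k, 16 - k) // 8)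
--                for k in range(17)]
--     out = []
--     i = j = 0
--     for ch in text:
--         if ch == '\n':
--             out.append('\n')
--             i += 1
--             j = 0
--         else:
--             out.append(palette[(i + j) % 17] + ch + "\033[0m")
--             j += 1
--     return ''.join(out)
-- ===== Notes on version B (the rewrite author's own statement) =====
-- stated objective: simpler
-- what changed: A splits the text into lines and runs nested enumerate loops, formatting each ANSI escape from the colour triple per character; B makes one pass over the raw string, tracking line and column counters reset at each newline, indexing 17 precomputed escape strings via a direct min(k, 16-k) palette formula.
import Mathlib
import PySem

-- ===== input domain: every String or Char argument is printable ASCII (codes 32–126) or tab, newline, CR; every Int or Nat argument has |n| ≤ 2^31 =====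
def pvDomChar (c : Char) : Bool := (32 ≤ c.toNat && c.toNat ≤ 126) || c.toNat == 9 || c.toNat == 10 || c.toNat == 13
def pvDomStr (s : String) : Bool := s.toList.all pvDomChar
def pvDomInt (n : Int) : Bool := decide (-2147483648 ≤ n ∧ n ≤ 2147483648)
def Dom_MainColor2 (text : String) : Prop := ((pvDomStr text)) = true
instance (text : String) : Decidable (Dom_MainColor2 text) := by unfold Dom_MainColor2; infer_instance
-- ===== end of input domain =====

-- B replaces A's split-into-lines + nested enumerate loops by a single pass over the raw
-- string tracking (line, column) counters, and builds the mirrored palette by a direct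
-- index formula instead of building a gradient and appending its reversed prefix (simpler).

-- ===== PORT A =====
def pvTextColor (r g b : Int) : List Char :=
  "\x1b[38;2;".toList ++ (PySem.Int.toStr r).toList ++ ";".toList ++
    (PySem.Int.toStr g).toList ++ ";".toList ++ (PySem.Int.toStr b).toList ++ "m".toList

def pvColors : List (Int × Int × Int) :=
  (PySem.List.pyRange 0 9 1).foldl
    (fun cs i =>
      cs ++ [(0 + PySem.Int.floordiv ((0 - 0) * i) (9 - 1),
              200 + PySem.Int.floordiv ((255 - 200) * i) (9 - 1),
              255 + PySem.Int.floordiv ((255 - 255) * i) (9 - 1))]) []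

def pvColorsFull : List (Int × Int × Int) :=
  pvColors ++ (PySem.List.slice pvColors none (some (-1))).reverse

-- the inner `for j, char in enumerate(line)` loop of A
def MainColor2Inner (i : Int) (numColors : Int) (res : List (List Char)) (l : List Char) :
    List (List Char) :=
  (PySem.List.enumerate l 0).foldl
    (fun res q =>
      res ++ [pvTextColor
          (PySem.List.pyGetD pvColorsFull (PySem.Int.mod (i + q.1) numColors) (0, 0, 0)).1
          (PySem.List.pyGetD pvColorsFull (PySem.Int.mod (i + q.1) numColors) (0, 0, 0)).2.1
          (PySem.List.pyGetD pvColorsFull (PySem.Int.mod (i + q.1) numColors) (0, 0, 0)).2.2 ++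
        [q.2] ++ "\x1b[0m".toList]) res

def MainColor2 (text : String) : String :=
  let lines := PySem.Chars.splitOn text.toList ['\n']
  let numColors : Int := (pvColorsFull.length : Int)
  let result : List (List Char) :=
    (PySem.List.enumerate lines 0).foldl
      (fun res p =>
        let res := MainColor2Inner p.1 numColors res p.2
        if p.1 < (lines.length : Int) - 1 then res ++ [['\n']] else res)
      []
  String.ofList (PySem.Chars.join [] result)

-- ===== PORT B =====
def pvPalette : List (List Char) :=
  (List.range 17).map (fun k =>
    "\x1b[38;2;0;".toList ++
      (PySem.Int.toStr (200 + PySem.Int.floordiv (55 * min (k : Int) (16 - (k : Int))) 8)).toList ++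
      ";255m".toList)

-- the body of B's single `for ch in text` loop
def MainColor2Step (st : Int × Int × List (List Char)) (ch : Char) :
    Int × Int × List (List Char) :=
  if ch = '\n' then (st.1 + 1, 0, st.2.2 ++ [['\n']])
  else (st.1, st.2.1 + 1,
    st.2.2 ++ [PySem.List.pyGetD pvPalette (PySem.Int.mod (st.1 + st.2.1) 17) [] ++
      [ch] ++ "\x1b[0m".toList])

def MainColor2_alt (text : String) : String :=
  let fin := text.toList.foldl MainColor2Step (0, 0, [])
  String.ofList (PySem.Chars.join [] fin.2.2)

-- ===== PRECONDITION & SPEC =====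
def Spec_MainColor2 (text : String) (out : String) : Prop := out = MainColor2_alt text
instance (text : String) (out : String) : Decidable (Spec_MainColor2 text out) := by unfold Spec_MainColor2; infer_instance

-- ===== CLAIM (what is proved, stated in full; the proofs are below) =====
def Claim_equal_MainColor2 : Prop := ∀ (text : String), Dom_MainColor2 text → Spec_MainColor2 text (MainColor2 text)

-- ===== LEMMAS AND PROOFS =====

def pvReset : List Char := "\x1b[0m".toList

def pvChunk (k : Nat) : List Char :=
  pvTextColor (pvColorsFull.getD k (0, 0, 0)).1 (pvColorsFull.getD k (0, 0, 0)).2.1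
    (pvColorsFull.getD k (0, 0, 0)).2.2

def pvSplitNL : List Char → List (List Char)
  | [] => [[]]
  | c :: cs => if c = '\n' then [] :: pvSplitNL cs else (pvSplitNL cs).modifyHead (c :: ·)

def pvLineR : List Char → Nat → Nat → List Char
  | [], _, _ => []
  | c :: l, i, j => pvChunk ((i + j) % 17) ++ c :: (pvReset ++ pvLineR l i (j + 1))

def pvARender : List (List Char) → Nat → Nat → List Char
  | [], _, _ => []
  | [l], i, j => pvLineR l i j
  | l :: l2 :: ls, i, j => pvLineR l i j ++ '\n' :: pvARender (l2 :: ls) (i + 1) 0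

def pvRender : List Char → Nat → Nat → List Char
  | [], _, _ => []
  | c :: cs, i, j =>
    if c = '\n' then '\n' :: pvRender cs (i + 1) 0
    else pvChunk ((i + j) % 17) ++ c :: (pvReset ++ pvRender cs i (j + 1))

theorem pvJoinNil (l : List (List Char)) : PySem.Chars.join [] l = l.flatten := by
  induction l with
  | nil => rfl
  | cons x xs ih =>
    cases xs with
    | nil => simp [PySem.Chars.join, List.intercalate]
    | cons y ys =>
      simp only [PySem.Chars.join, List.intercalate, List.intersperse] at ih ⊢
      simp [List.flatten, ih]

theorem pvSplitNL_ne_nil (cs : List Char) : pvSplitNL cs ≠ [] := by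
  induction cs with
  | nil => simp [pvSplitNL]
  | cons c cs ih =>
    simp only [pvSplitNL]
    split
    · simp
    · cases h : pvSplitNL cs with
      | nil => exact absurd h ih
      | cons a as => simp [List.modifyHead]

theorem pvGo (fuel : Nat) : ∀ (l cur : List Char) (acc : List (List Char)), l.length ≤ fuel →
    PySem.Chars.splitOn.go ['\n'] fuel l cur acc
      = acc.reverse ++ (pvSplitNL l).modifyHead (cur.reverse ++ ·) := by
  induction fuel with
  | zero =>
    intro l cur acc h
    have hl : l = [] := List.eq_nil_of_length_eq_zero (Nat.le_zero.mp h)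
    subst hl
    rw [PySem.Chars.splitOn.go.eq_def]
    simp [pvSplitNL]
  | succ fuel ih =>
    intro l cur acc h
    cases l with
    | nil =>
      rw [PySem.Chars.splitOn.go.eq_def]
      simp [pvSplitNL]
    | cons c rest =>
      have hstep : PySem.Chars.splitOn.go ['\n'] (fuel + 1) (c :: rest) cur acc =
          if ['\n'].isPrefixOf (c :: rest) then
            PySem.Chars.splitOn.go ['\n'] fuel (List.drop 1 (c :: rest)) [] (cur.reverse :: acc)
          else PySem.Chars.splitOn.go ['\n'] fuel rest (c :: cur) acc := by
        rw [PySem.Chars.splitOn.go.eq_def]; rfl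
      rw [hstep]
      have hlen : rest.length ≤ fuel := by simpa using h
      by_cases hc : c = '\n'
      · subst hc
        rw [if_pos (by simp [List.isPrefixOf])]
        rw [List.drop_one, List.tail_cons, ih rest [] (cur.reverse :: acc) hlen]
        cases hxx : pvSplitNL rest with
        | nil => exact absurd hxx (pvSplitNL_ne_nil rest)
        | cons a as =>
          simp [pvSplitNL, List.modifyHead]
          exact hxx.symm
      · rw [if_neg (by simp [List.isPrefixOf]; exact fun h => hc h.symm)]
        rw [ih rest (c :: cur) acc hlen]
        simp only [pvSplitNL, if_neg hc]
        cases hsp : pvSplitNL rest with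
        | nil => exact absurd hsp (pvSplitNL_ne_nil rest)
        | cons a as => simp [List.modifyHead]

theorem pvSplitOn_eq (cs : List Char) : PySem.Chars.splitOn cs ['\n'] = pvSplitNL cs := by
  have h := pvGo (cs.length + 1) cs [] [] (by omega)
  rw [PySem.Chars.splitOn, h]
  cases hsp : pvSplitNL cs with
  | nil => exact absurd hsp (pvSplitNL_ne_nil cs)
  | cons a as => simp [List.modifyHead]

theorem pvModNat (i j : Nat) :
    PySem.Int.mod ((i : Int) + (j : Int)) 17 = (((i + j) % 17 : Nat) : Int) := by
  simp [PySem.Int.mod, Int.fmod_eq_emod]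

theorem pvColorsLen : ((pvColorsFull.length : Nat) : Int) = 17 := by decide

theorem pvChunkB_eq : ∀ k : Nat, k < 17 → pvPalette.getD k [] = pvChunk k := by decide

theorem pvKey : ∀ (cs : List Char) (i j : Nat),
    pvARender (pvSplitNL cs) i j = pvRender cs i j := by
  intro cs
  induction cs with
  | nil => intro i j; rfl
  | cons c cs ih =>
    intro i j
    by_cases hc : c = '\n'
    · subst hc
      simp only [pvSplitNL, pvRender]
      cases h : pvSplitNL cs with
      | nil => exact absurd h (pvSplitNL_ne_nil cs)
      | cons l ls =>
        have hh := ih (i + 1) 0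
        rw [h] at hh
        simp [pvARender, hh, pvLineR]
    · simp only [pvSplitNL, if_neg hc, pvRender]
      cases h : pvSplitNL cs with
      | nil => exact absurd h (pvSplitNL_ne_nil cs)
      | cons l ls =>
        have hh := ih i (j + 1)
        rw [h] at hh
        cases ls with
        | nil =>
          simp only [List.modifyHead, pvARender, pvLineR]
          rw [← hh]
          simp [pvARender]
        | cons l2 ls2 =>
          simp only [List.modifyHead, pvARender, pvLineR]
          rw [← hh]
          simp [pvARender]

theorem pvInnerAux (i : Nat) : ∀ (l : List Char) (j : Nat) (res : List (List Char)),
    ((PySem.List.enumerate l (j : Int)).foldl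
      (fun res q =>
        res ++ [pvTextColor
            (PySem.List.pyGetD pvColorsFull (PySem.Int.mod ((i : Int) + q.1) 17) (0, 0, 0)).1
            (PySem.List.pyGetD pvColorsFull (PySem.Int.mod ((i : Int) + q.1) 17) (0, 0, 0)).2.1
            (PySem.List.pyGetD pvColorsFull (PySem.Int.mod ((i : Int) + q.1) 17) (0, 0, 0)).2.2 ++
          [q.2] ++ "\x1b[0m".toList]) res).flatten
      = res.flatten ++ pvLineR l i j := by
  intro l
  induction l with
  | nil => intro j res; simp [PySem.List.enumerate_nil, pvLineR]
  | cons c l ih =>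
    intro j res
    rw [PySem.List.enumerate_cons]
    have hj : (j : Int) + 1 = ((j + 1 : Nat) : Int) := by push_cast; ring
    simp only [List.foldl_cons, hj]
    rw [pvModNat, PySem.List.pyGetD_natCast]
    rw [ih (j + 1)]
    simp [pvLineR, pvChunk, pvReset]

theorem pvInner (i : Nat) (l : List Char) (res : List (List Char)) :
    (MainColor2Inner (i : Int) ((pvColorsFull.length : Nat) : Int) res l).flatten
      = res.flatten ++ pvLineR l i 0 := by
  rw [MainColor2Inner, pvColorsLen]
  have h := pvInnerAux i l 0 res
  simpa using h

theorem pvOuter : ∀ (ls : List (List Char)) (s L : Nat) (res : List (List Char)),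
    ls ≠ [] → s + ls.length = L →
    ((PySem.List.enumerate ls (s : Int)).foldl
      (fun res p =>
        let res := MainColor2Inner p.1 ((pvColorsFull.length : Nat) : Int) res p.2
        if p.1 < ((L : Nat) : Int) - 1 then res ++ [['\n']] else res) res).flatten
      = res.flatten ++ pvARender ls s 0 := by
  intro ls
  induction ls with
  | nil => intro s L res h; exact absurd rfl h
  | cons l ls ih =>
    intro s L res _ hL
    rw [PySem.List.enumerate_cons]
    cases ls with
    | nil =>
      have hcond : ¬ ((s : Int) < ((L : Nat) : Int) - 1) := by
        simp at hL; omega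
      simp only [List.foldl_cons, PySem.List.enumerate_nil, List.foldl_nil]
      rw [if_neg hcond, pvInner]
      rfl
    | cons l2 ls2 =>
      have hcond : ((s : Int) < ((L : Nat) : Int) - 1) := by
        simp at hL; omega
      have hs : (s : Int) + 1 = ((s + 1 : Nat) : Int) := by push_cast; ring
      simp only [List.foldl_cons, hs]
      rw [if_pos hcond]
      rw [ih (s + 1) L _ (by simp) (by simp at hL ⊢; omega)]
      simp only [List.flatten_append]
      rw [pvInner]
      simp [pvARender]

theorem pvA (text : String) :
    MainColor2 text = String.ofList (pvRender text.toList 0 0) := by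
  simp only [MainColor2]
  rw [pvJoinNil, pvSplitOn_eq]
  have h := pvOuter (pvSplitNL text.toList) 0 (pvSplitNL text.toList).length []
    (pvSplitNL_ne_nil _) (by omega)
  simp only [Nat.cast_zero] at h
  rw [h, pvKey]
  rfl

theorem pvStepNL (i j : Int) (out : List (List Char)) :
    MainColor2Step (i, j, out) '\n' = (i + 1, 0, out ++ [['\n']]) := by
  simp [MainColor2Step]

theorem pvStepC (i j : Int) (out : List (List Char)) (c : Char) (hc : c ≠ '\n') :
    MainColor2Step (i, j, out) c =
      (i, j + 1, out ++ [PySem.List.pyGetD pvPalette (PySem.Int.mod (i + j) 17) [] ++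
        [c] ++ "\x1b[0m".toList]) := by
  simp [MainColor2Step, hc]

theorem pvBGen : ∀ (cs : List Char) (i j : Nat) (out : List (List Char)),
    ((cs.foldl MainColor2Step ((i : Int), (j : Int), out)).2.2).flatten
      = out.flatten ++ pvRender cs i j := by
  intro cs
  induction cs with
  | nil => intro i j out; simp [pvRender]
  | cons c cs ih =>
    intro i j out
    by_cases hc : c = '\n'
    · subst hc
      rw [List.foldl_cons, pvStepNL]
      have hi : (i : Int) + 1 = ((i + 1 : Nat) : Int) := by push_cast; ring
      rw [hi]
      have h := ih (i + 1) 0 (out ++ [['\n']])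
      simp only [Nat.cast_zero] at h
      rw [h]
      simp [pvRender]
    · rw [List.foldl_cons, pvStepC _ _ _ _ hc]
      rw [pvModNat, PySem.List.pyGetD_natCast]
      have hj : (j : Int) + 1 = ((j + 1 : Nat) : Int) := by push_cast; ring
      rw [hj, ih i (j + 1)]
      rw [pvChunkB_eq _ (Nat.mod_lt _ (by norm_num))]
      simp [pvRender, if_neg hc, pvReset]

theorem pvB (text : String) :
    MainColor2_alt text = String.ofList (pvRender text.toList 0 0) := by
  simp only [MainColor2_alt]
  rw [pvJoinNil]
  have h := pvBGen text.toList 0 0 []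
  simp only [Nat.cast_zero] at h
  rw [h]
  rfl

-- ===== VERDICT (by name: the statement is the Claim_ definition above) =====
theorem MainColor2_spec : Claim_equal_MainColor2 := by
  intro text _
  unfold Spec_MainColor2
  rw [pvA, pvB]
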